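-- pv_equiv track=rewrite | github.com/halecakir/NLG | codes/notebooks/ExternalDataProcess/CallGraph.py | extract_permission_by_contentp
-- ===== SOURCE A (Python) =====
-- def extract_permission_by_contentp(method):
--     """Extract permissions which are requested by Content Providers"""
--     def is_exist(keyword, lst):
--         for line in lst:
--             if keyword.lower() in line.lower():
--                 return True
--         return False
--     permission_methods = []
--     exist_cr = is_exist("ContentResolver", method)
--     exist_q = is_exist("query", method)
--     exist_c = is_exist("contact", method)
--     if exist_cr and exist_q and exist_c:
--         permission_methods.append("READ_CONTACTS")
--     return permission_methods
-- ===== SOURCE B (Python) =====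
-- def extract_permission_by_contentp(method):
--     """Extract permissions which are requested by Content Providers"""
--     seen_cr = seen_q = seen_c = False
--     for line in method:
--         low = line.lower()
--         seen_cr = seen_cr or "contentresolver" in low
--         seen_q = seen_q or "query" in low
--         seen_c = seen_c or "contact" in low
--         if seen_cr and seen_q and seen_c:
--             break
--     return ["READ_CONTACTS"] if seen_cr and seen_q and seen_c else []
-- ===== Notes on version B (the rewrite author's own statement) =====
-- stated objective: simpler
-- what changed: Replaces three separate full scans (one per keyword via is_exist) with a single pass over the lines that accumulates three boolean flags and stops early once all are set.
import Mathlib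
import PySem

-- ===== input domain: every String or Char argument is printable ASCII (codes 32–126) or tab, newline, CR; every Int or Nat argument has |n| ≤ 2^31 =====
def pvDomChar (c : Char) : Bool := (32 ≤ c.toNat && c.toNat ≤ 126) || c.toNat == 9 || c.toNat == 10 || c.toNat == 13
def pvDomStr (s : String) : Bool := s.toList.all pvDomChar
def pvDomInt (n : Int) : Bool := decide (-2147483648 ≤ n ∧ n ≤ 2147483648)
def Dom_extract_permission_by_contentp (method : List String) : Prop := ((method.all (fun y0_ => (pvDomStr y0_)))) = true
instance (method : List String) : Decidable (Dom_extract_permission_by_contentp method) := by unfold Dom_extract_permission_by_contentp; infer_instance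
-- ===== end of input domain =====

-- B replaces three separate keyword scans with one pass accumulating three flags (simpler).

-- ===== PORT A =====
-- inner helper is_exist: first-match scan for keyword (case-insensitive substring)
def pvIsExist (keyword : String) (lst : List String) : Bool :=
  match lst with
  | [] => false
  | line :: rest =>
      if PySem.Str.isIn (PySem.Str.lower keyword) (PySem.Str.lower line) then true
      else pvIsExist keyword rest

def extract_permission_by_contentp (method : List String) : List String :=
  let permission_methods : List String := []
  let exist_cr := pvIsExist "ContentResolver" method
  let exist_q := pvIsExist "query" method
  let exist_c := pvIsExist "contact" method
  if exist_cr && exist_q && exist_c then permission_methods ++ ["READ_CONTACTS"]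
  else permission_methods

-- ===== PORT B =====
-- single loop ORing three flags, with early break once all are set
def pvAltLoop (method : List String) (seen_cr seen_q seen_c : Bool) : Bool × Bool × Bool :=
  match method with
  | [] => (seen_cr, seen_q, seen_c)
  | line :: rest =>
      let low := PySem.Str.lower line
      let seen_cr := seen_cr || PySem.Str.isIn "contentresolver" low
      let seen_q := seen_q || PySem.Str.isIn "query" low
      let seen_c := seen_c || PySem.Str.isIn "contact" low
      if seen_cr && seen_q && seen_c then (seen_cr, seen_q, seen_c)
      else pvAltLoop rest seen_cr seen_q seen_c

def extract_permission_by_contentp_alt (method : List String) : List String :=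
  let r := pvAltLoop method false false false
  if r.1 && r.2.1 && r.2.2 then ["READ_CONTACTS"] else []

-- ===== PRECONDITION & SPEC =====
def Spec_extract_permission_by_contentp (method : List String) (out : List String) : Prop := out = extract_permission_by_contentp_alt method
instance (method : List String) (out : List String) : Decidable (Spec_extract_permission_by_contentp method out) := by unfold Spec_extract_permission_by_contentp; infer_instance

-- ===== CLAIM (what is proved, stated in full; the proofs are below) =====
def Claim_equal_extract_permission_by_contentp : Prop := ∀ (method : List String), Dom_extract_permission_by_contentp method → Spec_extract_permission_by_contentp method (extract_permission_by_contentp method)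

-- ===== LEMMAS AND PROOFS =====

theorem pvIsExist_eq_any (keyword : String) (lst : List String) :
    pvIsExist keyword lst
      = lst.any (fun line => PySem.Str.isIn (PySem.Str.lower keyword) (PySem.Str.lower line)) := by
  induction lst with
  | nil => rfl
  | cons line rest ih =>
      simp only [pvIsExist, List.any_cons, ih]
      cases PySem.Str.isIn (PySem.Str.lower keyword) (PySem.Str.lower line) <;> simp

theorem pvAltLoop_eq (method : List String) (f1 f2 f3 : Bool) :
    pvAltLoop method f1 f2 f3
      = (f1 || method.any (fun line => PySem.Str.isIn "contentresolver" (PySem.Str.lower line)),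
         f2 || method.any (fun line => PySem.Str.isIn "query" (PySem.Str.lower line)),
         f3 || method.any (fun line => PySem.Str.isIn "contact" (PySem.Str.lower line))) := by
  induction method generalizing f1 f2 f3 with
  | nil => simp [pvAltLoop]
  | cons line rest ih =>
      simp only [pvAltLoop, List.any_cons]
      split_ifs with h
      · obtain ⟨⟨h1, h2⟩, h3⟩ := by simpa only [Bool.and_eq_true] using h
        simp only [← Bool.or_assoc, h1, h2, h3, Bool.true_or]
      · rw [ih]; simp [Bool.or_assoc]

theorem extract_permission_by_contentp_spec : Claim_equal_extract_permission_by_contentp := by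
  intro method _
  show extract_permission_by_contentp method = extract_permission_by_contentp_alt method
  have hcr : PySem.Str.lower "ContentResolver" = "contentresolver" := by decide
  have hq : PySem.Str.lower "query" = "query" := by decide
  have hc : PySem.Str.lower "contact" = "contact" := by decide
  simp only [extract_permission_by_contentp, extract_permission_by_contentp_alt,
    pvAltLoop_eq, pvIsExist_eq_any, hcr, hq, hc, Bool.false_or]
  rfl
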